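-- pv_equiv track=rewrite | github.com/ei1704/NT-WorkSpace | 14/14_06.py | my_resplit
-- ===== SOURCE A (Python) =====
-- def my_resplit(sentence, deleimiters=' '):
--   strs = []
--   strBuf = ""
--   for chr in sentence:
--     if chr in deleimiters:
--       strs.append(strBuf)
--       strBuf = ""
--     else:
--       strBuf += chr
--
--   strs.append(strBuf)
--   return strs
-- ===== SOURCE B (Python) =====
-- def my_resplit(sentence, deleimiters=' '):
--   # One pass of str.split per DISTINCT delimiter character, flattening as we
--   # go; str.split with an explicit separator keeps empty fields, so the result
--   # matches the char-by-char state machine exactly.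
--   parts = [sentence]
--   for d in dict.fromkeys(deleimiters):
--     parts = [piece for p in parts for piece in p.split(d)]
--   return parts
-- ===== Notes on version B (the rewrite author's own statement) =====
-- stated objective: idiomatic
-- what changed: Replaced A's single-pass character state machine (explicit buffer, append on delimiter) with one str.split pass per distinct delimiter character, flattening the pieces as it goes.
import Mathlib
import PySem

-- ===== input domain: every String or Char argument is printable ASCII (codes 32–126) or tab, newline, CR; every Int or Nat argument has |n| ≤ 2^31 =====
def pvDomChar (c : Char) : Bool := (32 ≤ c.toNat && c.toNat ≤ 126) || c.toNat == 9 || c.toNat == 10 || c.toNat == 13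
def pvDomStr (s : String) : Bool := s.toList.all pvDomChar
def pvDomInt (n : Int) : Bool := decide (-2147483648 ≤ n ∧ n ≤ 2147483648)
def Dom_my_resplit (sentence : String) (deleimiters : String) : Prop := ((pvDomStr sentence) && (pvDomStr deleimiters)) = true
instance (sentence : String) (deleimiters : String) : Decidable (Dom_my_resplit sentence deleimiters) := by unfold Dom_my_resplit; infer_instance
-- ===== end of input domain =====

-- B replaces A's single-pass character accumulator with one str.split pass per
-- delimiter character, flattened as it goes (objective: alternative/idiomatic).


-- ===== PORT A =====
-- Literal port of A: a fold carrying (strs, strBuf); 'chr in deleimiters' for a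
-- single char is exactly list membership in deleimiters.toList; strBuf is kept
-- as List Char and turned into a String where A appends it (exact on all inputs).
def my_resplit (sentence : String) (deleimiters : String) : List String :=
  let fin := sentence.toList.foldl
    (fun (st : List String × List Char) c =>
      if c ∈ deleimiters.toList then (st.1 ++ [String.ofList st.2], ([] : List Char))
      else (st.1, st.2 ++ [c]))
    ([], [])
  fin.1 ++ [String.ofList fin.2]

-- ===== PORT B =====
-- Hand port of Python's piece.split(d) for a single-char separator d: exact —
-- it keeps empty fields and returns [''] on the empty string.
def splitChar (c : Char) : List Char → List (List Char)
  | [] => [[]]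
  | a :: rest =>
    let t := splitChar c rest
    if a = c then [] :: t
    else
      match t with
      | [] => [[a]]   -- unreachable: splitChar never returns []
      | f :: ts => (a :: f) :: ts

def my_resplit_alt (sentence : String) (deleimiters : String) : List String :=
  ((PySem.Set.ofList deleimiters.toList).foldl
    (fun (parts : List (List Char)) c => parts.flatMap (splitChar c))
    [sentence.toList]).map String.ofList

-- ===== PRECONDITION & SPEC =====
def Spec_my_resplit (sentence : String) (deleimiters : String) (out : List String) : Prop := out = my_resplit_alt sentence deleimiters
instance (sentence : String) (deleimiters : String) (out : List String) : Decidable (Spec_my_resplit sentence deleimiters out) := by unfold Spec_my_resplit; infer_instance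

-- ===== CLAIM (what is proved, stated in full; the proofs are below) =====
def Claim_equal_my_resplit : Prop := ∀ (sentence : String) (deleimiters : String), Dom_my_resplit sentence deleimiters → Spec_my_resplit sentence deleimiters (my_resplit sentence deleimiters)

-- ===== LEMMAS AND PROOFS =====

-- canonical split by a SET of delimiter characters
def splitChars (d : List Char) : List Char → List (List Char)
  | [] => [[]]
  | a :: rest =>
    let t := splitChars d rest
    if a ∈ d then [] :: t
    else
      match t with
      | [] => [[a]]
      | f :: ts => (a :: f) :: ts

theorem splitChar_ne_nil (c : Char) (cs : List Char) : splitChar c cs ≠ [] := by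
  cases cs with
  | nil => simp [splitChar]
  | cons a rest =>
    simp only [splitChar]
    split_ifs
    · simp
    · rcases h : splitChar c rest with _ | ⟨f, ts⟩ <;> simp

theorem splitChars_ne_nil (d : List Char) (cs : List Char) : splitChars d cs ≠ [] := by
  cases cs with
  | nil => simp [splitChars]
  | cons a rest =>
    simp only [splitChars]
    split_ifs
    · simp
    · rcases h : splitChars d rest with _ | ⟨f, ts⟩ <;> simp

theorem splitChars_nil_delims (cs : List Char) : splitChars [] cs = [cs] := by
  induction cs with
  | nil => rfl
  | cons a rest ih => simp [splitChars, ih]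

-- A's loop, characterised: starting from (strs, buf) it produces strs and then
-- the split pieces, the first one glued behind buf.
theorem loopA (d : List Char) (cs : List Char) :
    ∀ (strs : List String) (buf : List Char),
    ((cs.foldl
        (fun (st : List String × List Char) c =>
          if c ∈ d then (st.1 ++ [String.ofList st.2], ([] : List Char))
          else (st.1, st.2 ++ [c]))
        (strs, buf)).1 ++
      [String.ofList (cs.foldl
        (fun (st : List String × List Char) c =>
          if c ∈ d then (st.1 ++ [String.ofList st.2], ([] : List Char))
          else (st.1, st.2 ++ [c]))
        (strs, buf)).2]) =
    strs ++ (match splitChars d cs with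
      | [] => [String.ofList buf]
      | f :: ts => String.ofList (buf ++ f) :: ts.map String.ofList) := by
  induction cs with
  | nil => intro strs buf; simp [splitChars]
  | cons a rest ih =>
    intro strs buf
    simp only [List.foldl_cons]
    by_cases ha : a ∈ d
    · simp only [ha, if_pos, splitChars]
      rw [ih]
      rcases h : splitChars d rest with _ | ⟨f, ts⟩
      · exact absurd h (splitChars_ne_nil d rest)
      · simp
    · simp only [ha, if_neg, not_false_iff, splitChars]
      rw [ih]
      rcases h : splitChars d rest with _ | ⟨f, ts⟩
      · exact absurd h (splitChars_ne_nil d rest)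
      · simp

theorem my_resplit_eq_canon (sentence deleimiters : String) :
    my_resplit sentence deleimiters =
      (splitChars deleimiters.toList sentence.toList).map String.ofList := by
  unfold my_resplit
  rw [loopA deleimiters.toList sentence.toList [] []]
  rcases h : splitChars deleimiters.toList sentence.toList with _ | ⟨f, ts⟩
  · exact absurd h (splitChars_ne_nil _ _)
  · simp

-- one str.split pass by c refines a split by the set p into a split by p ∪ {c}
theorem flatMap_splitChar (c : Char) (p : List Char) (cs : List Char) :
    (splitChars p cs).flatMap (splitChar c) = splitChars (p ++ [c]) cs := by
  induction cs with
  | nil => simp [splitChars, splitChar]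
  | cons a rest ih =>
    by_cases hap : a ∈ p
    · have hac : a ∈ p ++ [c] := List.mem_append_left _ hap
      simp only [splitChars, hap, hac, if_pos]
      simp only [List.flatMap_cons, splitChar, ih]
      simp
    · by_cases hc : a = c
      · subst hc
        have hac : a ∈ p ++ [a] := by simp
        simp only [splitChars, hap, if_neg, not_false_iff, hac, if_pos]
        rcases h : splitChars p rest with _ | ⟨f, ts⟩
        · exact absurd h (splitChars_ne_nil p rest)
        · simp only [List.flatMap_cons, splitChar, if_true]
          rw [List.cons_append]
          rw [show splitChar a f ++ ts.flatMap (splitChar a) = (f :: ts).flatMap (splitChar a) by simp, ← h, ih]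
      · have hac : a ∉ p ++ [c] := by simp [hap, hc]
        simp only [splitChars, hap, hac, if_neg, not_false_iff]
        rcases h : splitChars p rest with _ | ⟨f, ts⟩
        · exact absurd h (splitChars_ne_nil p rest)
        · simp only [List.flatMap_cons]
          have hsf : splitChar c (a :: f) =
              match splitChar c f with
              | [] => [[a]]
              | g :: gs => (a :: g) :: gs := by
            simp [splitChar, hc]
          rcases hf : splitChar c f with _ | ⟨g, gs⟩
          · exact absurd hf (splitChar_ne_nil c f)
          · rw [hsf, hf]
            have : splitChars (p ++ [c]) rest = (splitChar c f) ++ ts.flatMap (splitChar c) := by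
              rw [← ih, h]; simp
            rw [this, hf]
            simp

theorem foldlB (ds : List Char) :
    ∀ (p : List Char) (cs : List Char),
    ds.foldl (fun (parts : List (List Char)) c => parts.flatMap (splitChar c))
      (splitChars p cs) = splitChars (p ++ ds) cs := by
  induction ds with
  | nil => intro p cs; simp
  | cons c ds ih =>
    intro p cs
    simp only [List.foldl_cons, flatMap_splitChar c p cs, ih (p ++ [c]) cs]
    simp

theorem splitChars_congr (d d' : List Char) (hdd : ∀ a, a ∈ d ↔ a ∈ d') (cs : List Char) :
    splitChars d cs = splitChars d' cs := by
  induction cs with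
  | nil => rfl
  | cons a rest ih =>
    simp only [splitChars, ih]
    by_cases h : a ∈ d
    · rw [if_pos h, if_pos ((hdd a).mp h)]
    · rw [if_neg h, if_neg (fun h' => h ((hdd a).mpr h'))]

theorem my_resplit_alt_eq_canon (sentence deleimiters : String) :
    my_resplit_alt sentence deleimiters =
      (splitChars deleimiters.toList sentence.toList).map String.ofList := by
  unfold my_resplit_alt
  have h0 : [sentence.toList] = splitChars [] sentence.toList :=
    (splitChars_nil_delims sentence.toList).symm
  rw [h0, foldlB (PySem.Set.ofList deleimiters.toList) [] sentence.toList,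
    List.nil_append]
  rw [splitChars_congr (PySem.Set.ofList deleimiters.toList) deleimiters.toList
    (fun a => PySem.Set.mem_ofList deleimiters.toList a) sentence.toList]

-- ===== VERDICT (by name: the statement is the Claim_ definition above) =====
theorem my_resplit_spec : Claim_equal_my_resplit := by
  intro sentence deleimiters _
  unfold Spec_my_resplit
  rw [my_resplit_eq_canon, my_resplit_alt_eq_canon]
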